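-- pv_equiv track=rewrite | github.com/maheshgitte77/lipsync-fraud-api | app/proctor_signals.py | _count_direction_to_center_cycles
-- ===== SOURCE A (Python) =====
-- def _count_direction_to_center_cycles(direction_sequence: list[str], direction: str) -> int:
--     """
--     Count cycles of DIR -> CENTER in a compressed direction sequence.
--     Example: LEFT,CENTER,LEFT,CENTER => 2
--     """
--     if len(direction_sequence) < 2:
--         return 0
--
--     compressed: list[str] = []
--     for d in direction_sequence:
--         if not compressed or compressed[-1] != d:
--             compressed.append(d)
--
--     cycles = 0
--     for i in range(len(compressed) - 1):
--         if compressed[i] == direction and compressed[i + 1] == "CENTER":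
--             cycles += 1
--     return cycles
-- ===== SOURCE B (Python) =====
-- def _count_direction_to_center_cycles(direction_sequence: list[str], direction: str) -> int:
--     """One pass: track only the last distinct direction seen; count each
--     transition from `direction` to "CENTER"."""
--     prev = None
--     cycles = 0
--     for d in direction_sequence:
--         if d != prev:
--             if prev == direction and d == "CENTER":
--                 cycles += 1
--             prev = d
--     return cycles
-- ===== Notes on version B (the rewrite author's own statement) =====
-- stated objective: simpler
-- what changed: Replaces the two-pass scheme (build a compressed list, then index it with range(len-1)) by a single pass keeping only two scalars (last distinct direction, counter); no intermediate list and no length guard.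
import Mathlib
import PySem

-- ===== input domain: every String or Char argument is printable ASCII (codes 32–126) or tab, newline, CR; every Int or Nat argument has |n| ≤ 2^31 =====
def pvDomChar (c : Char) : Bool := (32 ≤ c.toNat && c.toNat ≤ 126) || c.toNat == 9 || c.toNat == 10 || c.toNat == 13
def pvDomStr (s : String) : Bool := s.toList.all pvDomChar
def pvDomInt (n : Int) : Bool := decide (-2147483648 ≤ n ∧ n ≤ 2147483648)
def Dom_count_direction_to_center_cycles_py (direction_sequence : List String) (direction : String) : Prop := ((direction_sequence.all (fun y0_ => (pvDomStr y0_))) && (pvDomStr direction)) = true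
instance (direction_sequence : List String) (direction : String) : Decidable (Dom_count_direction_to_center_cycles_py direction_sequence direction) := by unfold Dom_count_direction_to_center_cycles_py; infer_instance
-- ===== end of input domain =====

-- B replaces A's two passes (build a compressed list, then index it with range) by one
-- pass keeping only the last distinct direction and a counter (objective: simpler).

-- ===== PORT A =====
-- compressed.append(d) when compressed is empty or its last element differs from d
def pvStepA (acc : List String) (d : String) : List String :=
  if acc = [] ∨ acc.getLast? ≠ some d then acc ++ [d] else acc

def count_direction_to_center_cycles_py (direction_sequence : List String) (direction : String) : Int :=
  if direction_sequence.length < 2 then 0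
  else
    let compressed := direction_sequence.foldl pvStepA []
    (PySem.List.pyRange 0 ((compressed.length : Int) - 1) 1).foldl
      (fun cycles i =>
        if PySem.List.pyGetD compressed i "" = direction ∧
           PySem.List.pyGetD compressed (i + 1) "" = "CENTER"
        then cycles + 1 else cycles) 0

-- ===== PORT B =====
-- state = (prev, cycles); prev : Option String starts as None
def pvStepB (direction : String) (st : Option String × Int) (d : String) : Option String × Int :=
  if some d ≠ st.1 then
    (some d, st.2 + (if st.1 = some direction ∧ d = "CENTER" then 1 else 0))
  else st

def count_direction_to_center_cycles_py_alt (direction_sequence : List String) (direction : String) : Int :=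
  (direction_sequence.foldl (pvStepB direction) (none, 0)).2

-- ===== PRECONDITION & SPEC =====
def Spec_count_direction_to_center_cycles_py (direction_sequence : List String) (direction : String) (out : Int) : Prop := out = count_direction_to_center_cycles_py_alt direction_sequence direction
instance (direction_sequence : List String) (direction : String) (out : Int) : Decidable (Spec_count_direction_to_center_cycles_py direction_sequence direction out) := by unfold Spec_count_direction_to_center_cycles_py; infer_instance

-- ===== CLAIM (what is proved, stated in full; the proofs are below) =====
def Claim_equal_count_direction_to_center_cycles_py : Prop := ∀ (direction_sequence : List String) (direction : String), Dom_count_direction_to_center_cycles_py direction_sequence direction → Spec_count_direction_to_center_cycles_py direction_sequence direction (count_direction_to_center_cycles_py direction_sequence direction)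

-- ===== LEMMAS AND PROOFS =====

-- run-length compression of a list, given the previous distinct element p (not included)
def pvDedupFrom (p : String) : List String → List String
  | [] => []
  | d :: rest => if d = p then pvDedupFrom p rest else d :: pvDedupFrom d rest

-- number of adjacent pairs (direction, "CENTER")
def pvCountAdj (direction : String) : List String → Int
  | a :: b :: t => (if a = direction ∧ b = "CENTER" then 1 else 0) + pvCountAdj direction (b :: t)
  | _ => 0

-- A's first loop builds acc ++ p :: pvDedupFrom p seq
theorem pvFoldA_eq (seq : List String) : ∀ (acc : List String) (p : String),
    seq.foldl pvStepA (acc ++ [p]) = acc ++ p :: pvDedupFrom p seq := by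
  induction seq with
  | nil => intro acc p; simp [pvDedupFrom]
  | cons d rest ih =>
    intro acc p
    by_cases h : d = p
    · subst h
      simp [List.foldl_cons, pvStepA, pvDedupFrom, ih]
    · have : pvStepA (acc ++ [p]) d = (acc ++ [p]) ++ [d] := by
        simp [pvStepA, Ne.symm h]
      rw [List.foldl_cons, this, ih (acc ++ [p]) d]
      simp [pvDedupFrom, h]

-- B's loop from state (some p, c) counts adjacent pairs of p :: pvDedupFrom p seq
theorem pvFoldB_eq (direction : String) (seq : List String) : ∀ (p : String) (c : Int),
    (seq.foldl (pvStepB direction) (some p, c)).2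
      = c + pvCountAdj direction (p :: pvDedupFrom p seq) := by
  induction seq with
  | nil => intro p c; simp [pvCountAdj, pvDedupFrom]
  | cons d rest ih =>
    intro p c
    by_cases h : d = p
    · subst h
      simp [List.foldl_cons, pvStepB, pvDedupFrom, ih]
    · have hstep : pvStepB direction (some p, c) d
          = (some d, c + (if p = direction ∧ d = "CENTER" then 1 else 0)) := by
        simp [pvStepB, h]
      rw [List.foldl_cons, hstep, ih]
      simp [pvDedupFrom, h, pvCountAdj]
      ring

-- A's counting loop over range(len(l)-1) computes pvCountAdj
theorem pvCountAux_eq (direction : String) (l : List String) : ∀ (c : Int),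
    (List.range (l.length - 1)).foldl
      (fun (cycles : Int) (k : Nat) =>
        if l.getD k "" = direction ∧ l.getD (k + 1) "" = "CENTER"
        then cycles + 1 else cycles) c = c + pvCountAdj direction l := by
  induction l with
  | nil => intro c; simp [pvCountAdj]
  | cons a t iht =>
    intro c
    cases t with
    | nil => simp [pvCountAdj]
    | cons b t' =>
      have hl : (a :: b :: t').length - 1 = ((b :: t').length - 1) + 1 := by
        simp
      rw [hl, List.range_succ_eq_map, List.foldl_cons, List.foldl_map]
      have hhead :
          (if (a :: b :: t').getD 0 "" = direction ∧ (a :: b :: t').getD (0 + 1) "" = "CENTER"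
           then c + 1 else c)
          = c + (if a = direction ∧ b = "CENTER" then 1 else 0) := by
        simp only [List.getD_cons_zero, zero_add, List.getD_cons_succ]
        split_ifs <;> ring
      rw [hhead]
      have hc :
          (List.range ((b :: t').length - 1)).foldl
            (fun (cycles : Int) (k : Nat) =>
              if (a :: b :: t').getD (Nat.succ k) "" = direction ∧
                 (a :: b :: t').getD (Nat.succ k + 1) "" = "CENTER"
              then cycles + 1 else cycles)
            (c + (if a = direction ∧ b = "CENTER" then 1 else 0))
          = (List.range ((b :: t').length - 1)).foldl
            (fun (cycles : Int) (k : Nat) =>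
              if (b :: t').getD k "" = direction ∧ (b :: t').getD (k + 1) "" = "CENTER"
              then cycles + 1 else cycles)
            (c + (if a = direction ∧ b = "CENTER" then 1 else 0)) := by
        apply PySem.List.foldl_congr_mem
        intro acc k _
        simp [Nat.succ_eq_add_one]
      rw [hc, iht]
      simp only [pvCountAdj]
      ring

theorem pvCount_range_eq (direction : String) (l : List String) :
    (PySem.List.pyRange 0 ((l.length : Int) - 1) 1).foldl
      (fun cycles i =>
        if PySem.List.pyGetD l i "" = direction ∧
           PySem.List.pyGetD l (i + 1) "" = "CENTER"
        then cycles + 1 else cycles) 0 = pvCountAdj direction l := by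
  rw [PySem.List.pyRange_one, List.foldl_map]
  have hlen : (((l.length : Int) - 1) - 0).toNat = l.length - 1 := by omega
  rw [hlen]
  have h := pvCountAux_eq direction l 0
  simp only [zero_add, ← Nat.cast_add_one, PySem.List.pyGetD_natCast]
  simpa using h

-- B on d :: rest equals pvCountAdj of the compressed list d :: pvDedupFrom d rest
theorem pvAltCons (direction d : String) (rest : List String) :
    count_direction_to_center_cycles_py_alt (d :: rest) direction
      = pvCountAdj direction (d :: pvDedupFrom d rest) := by
  unfold count_direction_to_center_cycles_py_alt
  have hstep : pvStepB direction (none, 0) d = (some d, 0) := by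
    simp [pvStepB]
  rw [List.foldl_cons, hstep, pvFoldB_eq]
  ring

-- ===== VERDICT (by name: the statement is the Claim_ definition above) =====
theorem count_direction_to_center_cycles_py_spec : Claim_equal_count_direction_to_center_cycles_py := by
  intro ds dir _
  unfold Spec_count_direction_to_center_cycles_py
  cases ds with
  | nil => rfl
  | cons d rest =>
    rw [pvAltCons]
    cases rest with
    | nil =>
      simp [count_direction_to_center_cycles_py, pvDedupFrom, pvCountAdj]
    | cons e t =>
      unfold count_direction_to_center_cycles_py
      have hlen : ¬ (d :: e :: t).length < 2 := by simp
      rw [if_neg hlen]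
      have hcomp : (d :: e :: t).foldl pvStepA []
          = d :: pvDedupFrom d (e :: t) := by
        have h0 : pvStepA [] d = [] ++ [d] := by simp [pvStepA]
        rw [List.foldl_cons, h0, pvFoldA_eq]
        simp
      simp only [hcomp]
      exact pvCount_range_eq dir (d :: pvDedupFrom d (e :: t))
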